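-- pv_equiv track=rewrite | github.com/NatesVibeCode/Praxis | Code&DBs/Workflow/surfaces/api/native_operator_surface.py | _smoke_failure_category
-- ===== SOURCE A (Python) =====
-- from collections.abc import Awaitable, Callable, Mapping, Sequence
-- from typing import Any
--
-- def _smoke_failure_category(row: Mapping[str, Any]) -> str:
--     normalized = " ".join(
--         str(row.get(field_name) or "").strip().lower()
--         for field_name in ("terminal_reason_code", "current_state")
--     )
--     if not normalized:
--         return "unknown"
--     if any(token in normalized for token in ("succeeded", "success", "promoted", "completed")):
--         return "success"
--     if any(token in normalized for token in ("schema", "migration", "column", "undefinedcolumn")):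
--         return "schema_drift"
--     if any(token in normalized for token in ("timeout", "timed_out", "deadline", "latency")):
--         return "provider_timeout"
--     if any(token in normalized for token in ("sandbox", "seatbelt", "permission denied", "denied")):
--         return "sandbox_denied"
--     if any(token in normalized for token in ("idempotency", "duplicate", "dedupe", "conflict")):
--         return "idempotency_conflict"
--     if any(token in normalized for token in ("database", "postgres", "sqlstate", "unreachable", "connection")):
--         return "db_unreachable"
--     if any(token in normalized for token in ("packet", "drift", "compile_index")):
--         return "packet_drift"
--     if "cancel" in normalized:
--         return "cancelled"
--     if any(token in normalized for token in ("blocked", "rejected", "admission", "gate")):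
--         return "policy_blocked"
--     if any(token in normalized for token in ("running", "claim_", "lease_", "proposal_", "gate_", "accepted", "requested")):
--         return "in_progress"
--     if any(token in normalized for token in ("failed", "dead_letter", "error", "invalid")):
--         return "execution_failed"
--     return "unknown"
-- ===== SOURCE B (Python) =====
-- _CATEGORIES = [
--     "success", "schema_drift", "provider_timeout", "sandbox_denied",
--     "idempotency_conflict", "db_unreachable", "packet_drift", "cancelled",
--     "policy_blocked", "in_progress", "execution_failed",
-- ]
--
-- _TOKEN_PRIORITY = [
--     ("succeeded", 0), ("success", 0), ("promoted", 0), ("completed", 0),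
--     ("schema", 1), ("migration", 1), ("column", 1), ("undefinedcolumn", 1),
--     ("timeout", 2), ("timed_out", 2), ("deadline", 2), ("latency", 2),
--     ("sandbox", 3), ("seatbelt", 3), ("permission denied", 3), ("denied", 3),
--     ("idempotency", 4), ("duplicate", 4), ("dedupe", 4), ("conflict", 4),
--     ("database", 5), ("postgres", 5), ("sqlstate", 5), ("unreachable", 5), ("connection", 5),
--     ("packet", 6), ("drift", 6), ("compile_index", 6),
--     ("cancel", 7),
--     ("blocked", 8), ("rejected", 8), ("admission", 8), ("gate", 8),
--     ("running", 9), ("claim_", 9), ("lease_", 9), ("proposal_", 9), ("gate_", 9),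
--     ("accepted", 9), ("requested", 9),
--     ("failed", 10), ("dead_letter", 10), ("error", 10), ("invalid", 10),
-- ]
--
--
-- def _smoke_failure_category(row) -> str:
--     normalized = " ".join(
--         str(row.get(field_name) or "").strip().lower()
--         for field_name in ("terminal_reason_code", "current_state")
--     )
--     # One left-to-right scan of the text: at each position, note any token that
--     # starts there and keep the minimum category priority seen so far.
--     best = len(_CATEGORIES)
--     for i in range(len(normalized)):
--         for token, priority in _TOKEN_PRIORITY:
--             if priority < best and normalized.startswith(token, i):
--                 best = priority
--     return _CATEGORIES[best] if best < len(_CATEGORIES) else "unknown"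
-- ===== Notes on version B (the rewrite author's own statement) =====
-- stated objective: alternative
-- what changed: Replaces the priority-ordered chain of per-token substring searches with a single left-to-right scan of the normalized text that, at each position, checks which tokens start there and maintains a minimum-category-priority accumulator; the answer is the category of that minimum (first-match priority equals minimum priority).
import Mathlib
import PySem

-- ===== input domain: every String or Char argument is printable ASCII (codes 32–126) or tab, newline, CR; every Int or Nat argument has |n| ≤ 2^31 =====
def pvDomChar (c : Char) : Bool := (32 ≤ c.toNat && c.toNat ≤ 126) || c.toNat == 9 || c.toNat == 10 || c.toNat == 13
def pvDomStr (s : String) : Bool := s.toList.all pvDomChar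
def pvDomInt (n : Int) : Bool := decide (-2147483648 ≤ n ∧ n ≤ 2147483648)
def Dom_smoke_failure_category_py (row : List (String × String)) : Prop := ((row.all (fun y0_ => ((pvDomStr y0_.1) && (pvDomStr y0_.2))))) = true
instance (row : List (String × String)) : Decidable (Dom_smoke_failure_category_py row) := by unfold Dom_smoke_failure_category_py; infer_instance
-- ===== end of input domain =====

-- B replaces A's priority-ordered if/any chain of substring searches with one left-to-right scan of the text keeping a minimum-priority accumulator (alternative algorithm; same values).


-- ===== PORT A =====
def smoke_failure_category_py (row : List (String × String)) : String :=
  let normalized := PySem.Str.join " "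
    (["terminal_reason_code", "current_state"].map
      (fun field_name => PySem.Str.lower (PySem.Str.strip (PySem.Dict.getD ⟨row⟩ field_name ""))))
  if normalized = "" then "unknown"
  else if ["succeeded", "success", "promoted", "completed"].any (fun token => PySem.Str.isIn token normalized) then "success"
  else if ["schema", "migration", "column", "undefinedcolumn"].any (fun token => PySem.Str.isIn token normalized) then "schema_drift"
  else if ["timeout", "timed_out", "deadline", "latency"].any (fun token => PySem.Str.isIn token normalized) then "provider_timeout"
  else if ["sandbox", "seatbelt", "permission denied", "denied"].any (fun token => PySem.Str.isIn token normalized) then "sandbox_denied"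
  else if ["idempotency", "duplicate", "dedupe", "conflict"].any (fun token => PySem.Str.isIn token normalized) then "idempotency_conflict"
  else if ["database", "postgres", "sqlstate", "unreachable", "connection"].any (fun token => PySem.Str.isIn token normalized) then "db_unreachable"
  else if ["packet", "drift", "compile_index"].any (fun token => PySem.Str.isIn token normalized) then "packet_drift"
  else if PySem.Str.isIn "cancel" normalized then "cancelled"
  else if ["blocked", "rejected", "admission", "gate"].any (fun token => PySem.Str.isIn token normalized) then "policy_blocked"
  else if ["running", "claim_", "lease_", "proposal_", "gate_", "accepted", "requested"].any (fun token => PySem.Str.isIn token normalized) then "in_progress"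
  else if ["failed", "dead_letter", "error", "invalid"].any (fun token => PySem.Str.isIn token normalized) then "execution_failed"
  else "unknown"

-- ===== PORT B (one scan of the text; minimum-priority accumulator) =====
def pvCategories : List String :=
  ["success", "schema_drift", "provider_timeout", "sandbox_denied",
   "idempotency_conflict", "db_unreachable", "packet_drift", "cancelled",
   "policy_blocked", "in_progress", "execution_failed"]

def pvTokenPriority : List (String × Nat) :=
  [("succeeded", 0), ("success", 0), ("promoted", 0), ("completed", 0),
   ("schema", 1), ("migration", 1), ("column", 1), ("undefinedcolumn", 1),
   ("timeout", 2), ("timed_out", 2), ("deadline", 2), ("latency", 2),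
   ("sandbox", 3), ("seatbelt", 3), ("permission denied", 3), ("denied", 3),
   ("idempotency", 4), ("duplicate", 4), ("dedupe", 4), ("conflict", 4),
   ("database", 5), ("postgres", 5), ("sqlstate", 5), ("unreachable", 5), ("connection", 5),
   ("packet", 6), ("drift", 6), ("compile_index", 6),
   ("cancel", 7),
   ("blocked", 8), ("rejected", 8), ("admission", 8), ("gate", 8),
   ("running", 9), ("claim_", 9), ("lease_", 9), ("proposal_", 9), ("gate_", 9),
   ("accepted", 9), ("requested", 9),
   ("failed", 10), ("dead_letter", 10), ("error", 10), ("invalid", 10)]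

-- inner loop body: `normalized.startswith(token, i)` is exact as a prefix test on the i-th tail
-- (Source B only calls it with 0 ≤ i < len(normalized))
def pvScanPos (tail : List Char) (best : Nat) : Nat :=
  pvTokenPriority.foldl
    (fun b tp => if tp.2 < b ∧ PySem.Chars.startswith tail tp.1.toList = true then tp.2 else b)
    best

def smoke_failure_category_py_alt (row : List (String × String)) : String :=
  let normalized := PySem.Str.join " "
    (["terminal_reason_code", "current_state"].map
      (fun field_name => PySem.Str.lower (PySem.Str.strip (PySem.Dict.getD ⟨row⟩ field_name ""))))
  let cs := normalized.toList
  let best := (List.range cs.length).foldl (fun b i => pvScanPos (cs.drop i) b) pvCategories.length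
  if best < pvCategories.length then pvCategories.getD best "unknown" else "unknown"

-- ===== PRECONDITION & SPEC =====
def Spec_smoke_failure_category_py (row : List (String × String)) (out : String) : Prop := out = smoke_failure_category_py_alt row
instance (row : List (String × String)) (out : String) : Decidable (Spec_smoke_failure_category_py row out) := by unfold Spec_smoke_failure_category_py; infer_instance

-- ===== CLAIM (what is proved, stated in full; the proofs are below) =====
def Claim_equal_smoke_failure_category_py : Prop := ∀ (row : List (String × String)), Dom_smoke_failure_category_py row → Spec_smoke_failure_category_py row (smoke_failure_category_py row)

-- ===== LEMMAS AND PROOFS =====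

-- whether some token of priority k occurs in cs
def pvMatch (cs : List Char) (k : Nat) : Bool :=
  pvTokenPriority.any (fun tp => tp.2 == k && PySem.Chars.isIn tp.1.toList cs)

-- the inner fold only ever decreases the accumulator
theorem pvScan_le (l : List (String × Nat)) (tail : List Char) (b : Nat) :
    l.foldl (fun b tp => if tp.2 < b ∧ PySem.Chars.startswith tail tp.1.toList = true then tp.2 else b) b ≤ b := by
  induction l generalizing b with
  | nil => simp
  | cons hd tl ih =>
      simp only [List.foldl_cons]
      split_ifs with h
      · exact le_trans (ih hd.2) (le_of_lt h.1)
      · exact ih b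

theorem pvScan_le_of_mem (l : List (String × Nat)) (tail : List Char) (b : Nat)
    (tp : String × Nat) (hmem : tp ∈ l) (hsw : PySem.Chars.startswith tail tp.1.toList = true) :
    l.foldl (fun b tp => if tp.2 < b ∧ PySem.Chars.startswith tail tp.1.toList = true then tp.2 else b) b ≤ tp.2 := by
  induction l generalizing b with
  | nil => cases hmem
  | cons hd tl ih =>
      simp only [List.foldl_cons]
      rcases List.mem_cons.mp hmem with h | h
      · subst h
        split_ifs with hc
        · exact pvScan_le tl tail tp.2
        · have hb : ¬ tp.2 < b := fun hlt => hc ⟨hlt, hsw⟩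
          exact le_trans (pvScan_le tl tail b) (by omega)
      · split_ifs with hc
        · exact ih hd.2 h
        · exact ih b h

theorem pvScan_cases (l : List (String × Nat)) (tail : List Char) (b : Nat) :
    l.foldl (fun b tp => if tp.2 < b ∧ PySem.Chars.startswith tail tp.1.toList = true then tp.2 else b) b = b ∨
    ∃ tp ∈ l, PySem.Chars.startswith tail tp.1.toList = true ∧
      l.foldl (fun b tp => if tp.2 < b ∧ PySem.Chars.startswith tail tp.1.toList = true then tp.2 else b) b = tp.2 := by
  induction l generalizing b with
  | nil => left; rfl
  | cons hd tl ih =>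
      simp only [List.foldl_cons]
      split_ifs with h
      · rcases ih hd.2 with heq | ⟨tp, hmem, hsw, heq⟩
        · right; exact ⟨hd, List.mem_cons_self, h.2, heq⟩
        · right; exact ⟨tp, List.mem_cons_of_mem _ hmem, hsw, heq⟩
      · rcases ih b with heq | ⟨tp, hmem, hsw, heq⟩
        · left; exact heq
        · right; exact ⟨tp, List.mem_cons_of_mem _ hmem, hsw, heq⟩

-- outer fold versions
theorem pvBest_le (idxs : List Nat) (cs : List Char) (b : Nat) :
    idxs.foldl (fun b i => pvScanPos (cs.drop i) b) b ≤ b := by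
  induction idxs generalizing b with
  | nil => simp
  | cons hd tl ih =>
      simp only [List.foldl_cons]
      exact le_trans (ih _) (pvScan_le _ _ _)

theorem pvBest_le_of_mem (idxs : List Nat) (cs : List Char) (b : Nat)
    (i : Nat) (hi : i ∈ idxs) (tp : String × Nat) (hmem : tp ∈ pvTokenPriority)
    (hsw : PySem.Chars.startswith (cs.drop i) tp.1.toList = true) :
    idxs.foldl (fun b i => pvScanPos (cs.drop i) b) b ≤ tp.2 := by
  induction idxs generalizing b with
  | nil => cases hi
  | cons hd tl ih =>
      simp only [List.foldl_cons]
      rcases List.mem_cons.mp hi with h | h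
      · subst h
        exact le_trans (pvBest_le tl cs _) (pvScan_le_of_mem _ _ _ tp hmem hsw)
      · exact ih _ h

theorem pvBest_cases (idxs : List Nat) (cs : List Char) (b : Nat) :
    idxs.foldl (fun b i => pvScanPos (cs.drop i) b) b = b ∨
    ∃ i ∈ idxs, ∃ tp ∈ pvTokenPriority, PySem.Chars.startswith (cs.drop i) tp.1.toList = true ∧
      idxs.foldl (fun b i => pvScanPos (cs.drop i) b) b = tp.2 := by
  induction idxs generalizing b with
  | nil => left; rfl
  | cons hd tl ih =>
      simp only [List.foldl_cons]
      rcases ih (pvScanPos (cs.drop hd) b) with heq | ⟨i, hi, tp, hmem, hsw, heq⟩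
      · rw [heq]
        rcases pvScan_cases pvTokenPriority (cs.drop hd) b with h2 | ⟨tp, hmem, hsw, h2⟩
        · left; exact h2
        · right; exact ⟨hd, List.mem_cons_self, tp, hmem, hsw, h2⟩
      · right; exact ⟨i, List.mem_cons_of_mem _ hi, tp, hmem, hsw, heq⟩

-- prefix-at-a-position ↔ substring occurrence, for a nonempty token
theorem pvInfix_iff (tok : List Char) (cs : List Char) (hne : tok ≠ []) :
    (∃ i ∈ List.range cs.length, PySem.Chars.startswith (cs.drop i) tok = true) ↔
      PySem.Chars.isIn tok cs = true := by
  rw [← PySem.Chars.exists_prefix_drop_iff_isIn]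
  constructor
  · rintro ⟨i, _, hsw⟩
    exact ⟨i, (PySem.Chars.startswith_iff _ _).mp hsw⟩
  · rintro ⟨j, hpre⟩
    have hjlt : j < cs.length := by
      by_contra h
      rw [List.drop_eq_nil_of_le (by omega)] at hpre
      exact hne (List.prefix_nil.mp hpre)
    exact ⟨j, List.mem_range.mpr hjlt, (PySem.Chars.startswith_iff _ _).mpr hpre⟩

def pvBestOf (cs : List Char) : Nat :=
  (List.range cs.length).foldl (fun b i => pvScanPos (cs.drop i) b) pvCategories.length

theorem pvBestOf_le_of_match (cs : List Char) (k : Nat) (h : pvMatch cs k = true) :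
    pvBestOf cs ≤ k := by
  rcases List.any_eq_true.mp h with ⟨tp, hmem, hok⟩
  simp only [Bool.and_eq_true] at hok
  obtain ⟨hk, hin⟩ := hok
  have hkk : tp.2 = k := by simpa using hk
  have hne : tp.1.toList ≠ [] := by
    fin_cases hmem <;> simp
  rcases (pvInfix_iff tp.1.toList cs hne).mpr hin with ⟨i, hi, hsw⟩
  have hle := pvBest_le_of_mem (List.range cs.length) cs pvCategories.length i hi tp hmem hsw
  unfold pvBestOf
  omega

theorem pvBestOf_match_or (cs : List Char) :
    pvBestOf cs = pvCategories.length ∨ pvMatch cs (pvBestOf cs) = true := by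
  rcases pvBest_cases (List.range cs.length) cs pvCategories.length with h | ⟨i, hi, tp, hmem, hsw, heq⟩
  · left; exact h
  · right
    unfold pvBestOf
    rw [heq]
    refine List.any_eq_true.mpr ⟨tp, hmem, ?_⟩
    have hne : tp.1.toList ≠ [] := by fin_cases hmem <;> simp
    have hin := (pvInfix_iff tp.1.toList cs hne).mp ⟨i, hi, hsw⟩
    simp [hin]

-- the scan computes the first matching priority of A's chain
set_option maxHeartbeats 1000000 in
theorem pvBestOf_eq_chain (cs : List Char) :
    pvBestOf cs =
      (if pvMatch cs 0 then 0 else if pvMatch cs 1 then 1 else if pvMatch cs 2 then 2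
       else if pvMatch cs 3 then 3 else if pvMatch cs 4 then 4 else if pvMatch cs 5 then 5
       else if pvMatch cs 6 then 6 else if pvMatch cs 7 then 7 else if pvMatch cs 8 then 8
       else if pvMatch cs 9 then 9 else if pvMatch cs 10 then 10 else 11) := by
  have hle : pvBestOf cs ≤ 11 := by
    have h := pvBest_le (List.range cs.length) cs pvCategories.length
    unfold pvBestOf
    simpa using h
  have hor := pvBestOf_match_or cs
  have hub : ∀ k, pvMatch cs k = true → pvBestOf cs ≤ k := fun k hk => pvBestOf_le_of_match cs k hk
  have key : ∀ k, k < 11 → (∀ j, j < k → pvMatch cs j = false) → pvMatch cs k = true →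
      pvBestOf cs = k := by
    intro k hk11 hprev hk
    have h1 : pvBestOf cs ≤ k := hub k hk
    rcases hor with h11 | hm
    · rw [show pvCategories.length = 11 from rfl] at h11
      omega
    · have h2 : ¬ pvBestOf cs < k := fun hlt => by
        rw [hprev _ hlt] at hm
        exact Bool.false_ne_true hm
      omega
  split_ifs with h0 h1 h2 h3 h4 h5 h6 h7 h8 h9 h10
  · exact key 0 (by omega) (by omega) h0
  · exact key 1 (by omega) (fun j hj => by interval_cases j; simp_all) h1
  · exact key 2 (by omega) (fun j hj => by interval_cases j <;> simp_all) h2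
  · exact key 3 (by omega) (fun j hj => by interval_cases j <;> simp_all) h3
  · exact key 4 (by omega) (fun j hj => by interval_cases j <;> simp_all) h4
  · exact key 5 (by omega) (fun j hj => by interval_cases j <;> simp_all) h5
  · exact key 6 (by omega) (fun j hj => by interval_cases j <;> simp_all) h6
  · exact key 7 (by omega) (fun j hj => by interval_cases j <;> simp_all) h7
  · exact key 8 (by omega) (fun j hj => by interval_cases j <;> simp_all) h8
  · exact key 9 (by omega) (fun j hj => by interval_cases j <;> simp_all) h9
  · exact key 10 (by omega) (fun j hj => by interval_cases j <;> simp_all) h10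
  · rcases hor with h11 | hm
    · rw [show pvCategories.length = 11 from rfl] at h11
      omega
    · by_contra hne
      have hlt : pvBestOf cs < 11 := by omega
      set m := pvBestOf cs with hmdef
      interval_cases m <;> simp_all

-- A's k-th branch condition equals pvMatch at priority k
theorem pvCond0 (s : String) : (["succeeded", "success", "promoted", "completed"].any (fun token => PySem.Str.isIn token s)) = pvMatch s.toList 0 := by
  simp [pvMatch, pvTokenPriority]
theorem pvCond1 (s : String) : (["schema", "migration", "column", "undefinedcolumn"].any (fun token => PySem.Str.isIn token s)) = pvMatch s.toList 1 := by
  simp [pvMatch, pvTokenPriority]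
theorem pvCond2 (s : String) : (["timeout", "timed_out", "deadline", "latency"].any (fun token => PySem.Str.isIn token s)) = pvMatch s.toList 2 := by
  simp [pvMatch, pvTokenPriority]
theorem pvCond3 (s : String) : (["sandbox", "seatbelt", "permission denied", "denied"].any (fun token => PySem.Str.isIn token s)) = pvMatch s.toList 3 := by
  simp [pvMatch, pvTokenPriority]
theorem pvCond4 (s : String) : (["idempotency", "duplicate", "dedupe", "conflict"].any (fun token => PySem.Str.isIn token s)) = pvMatch s.toList 4 := by
  simp [pvMatch, pvTokenPriority]
theorem pvCond5 (s : String) : (["database", "postgres", "sqlstate", "unreachable", "connection"].any (fun token => PySem.Str.isIn token s)) = pvMatch s.toList 5 := by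
  simp [pvMatch, pvTokenPriority]
theorem pvCond6 (s : String) : (["packet", "drift", "compile_index"].any (fun token => PySem.Str.isIn token s)) = pvMatch s.toList 6 := by
  simp [pvMatch, pvTokenPriority]
theorem pvCond7 (s : String) : (PySem.Str.isIn "cancel" s) = pvMatch s.toList 7 := by
  simp [pvMatch, pvTokenPriority]
theorem pvCond8 (s : String) : (["blocked", "rejected", "admission", "gate"].any (fun token => PySem.Str.isIn token s)) = pvMatch s.toList 8 := by
  simp [pvMatch, pvTokenPriority]
theorem pvCond9 (s : String) : (["running", "claim_", "lease_", "proposal_", "gate_", "accepted", "requested"].any (fun token => PySem.Str.isIn token s)) = pvMatch s.toList 9 := by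
  simp [pvMatch, pvTokenPriority]
theorem pvCond10 (s : String) : (["failed", "dead_letter", "error", "invalid"].any (fun token => PySem.Str.isIn token s)) = pvMatch s.toList 10 := by
  simp [pvMatch, pvTokenPriority]

-- both port bodies, abstracted over the shared normalized string
set_option maxHeartbeats 1000000 in
theorem pvAB (s : String) :
    (if s = "" then "unknown"
     else if ["succeeded", "success", "promoted", "completed"].any (fun token => PySem.Str.isIn token s) then "success"
     else if ["schema", "migration", "column", "undefinedcolumn"].any (fun token => PySem.Str.isIn token s) then "schema_drift"
     else if ["timeout", "timed_out", "deadline", "latency"].any (fun token => PySem.Str.isIn token s) then "provider_timeout"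
     else if ["sandbox", "seatbelt", "permission denied", "denied"].any (fun token => PySem.Str.isIn token s) then "sandbox_denied"
     else if ["idempotency", "duplicate", "dedupe", "conflict"].any (fun token => PySem.Str.isIn token s) then "idempotency_conflict"
     else if ["database", "postgres", "sqlstate", "unreachable", "connection"].any (fun token => PySem.Str.isIn token s) then "db_unreachable"
     else if ["packet", "drift", "compile_index"].any (fun token => PySem.Str.isIn token s) then "packet_drift"
     else if PySem.Str.isIn "cancel" s then "cancelled"
     else if ["blocked", "rejected", "admission", "gate"].any (fun token => PySem.Str.isIn token s) then "policy_blocked"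
     else if ["running", "claim_", "lease_", "proposal_", "gate_", "accepted", "requested"].any (fun token => PySem.Str.isIn token s) then "in_progress"
     else if ["failed", "dead_letter", "error", "invalid"].any (fun token => PySem.Str.isIn token s) then "execution_failed"
     else "unknown") =
    (if pvBestOf s.toList < pvCategories.length then pvCategories.getD (pvBestOf s.toList) "unknown"
     else "unknown") := by
  by_cases hs : s = ""
  · subst hs
    decide
  · rw [if_neg hs, pvCond0 s, pvCond1 s, pvCond2 s, pvCond3 s, pvCond4 s, pvCond5 s,
        pvCond6 s, pvCond7 s, pvCond8 s, pvCond9 s, pvCond10 s, pvBestOf_eq_chain s.toList]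
    by_cases h0 : pvMatch s.toList 0 = true
    · simp [h0, pvCategories]
    by_cases h1 : pvMatch s.toList 1 = true
    · simp [h0, h1, pvCategories]
    by_cases h2 : pvMatch s.toList 2 = true
    · simp [h0, h1, h2, pvCategories]
    by_cases h3 : pvMatch s.toList 3 = true
    · simp [h0, h1, h2, h3, pvCategories]
    by_cases h4 : pvMatch s.toList 4 = true
    · simp [h0, h1, h2, h3, h4, pvCategories]
    by_cases h5 : pvMatch s.toList 5 = true
    · simp [h0, h1, h2, h3, h4, h5, pvCategories]
    by_cases h6 : pvMatch s.toList 6 = true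
    · simp [h0, h1, h2, h3, h4, h5, h6, pvCategories]
    by_cases h7 : pvMatch s.toList 7 = true
    · simp [h0, h1, h2, h3, h4, h5, h6, h7, pvCategories]
    by_cases h8 : pvMatch s.toList 8 = true
    · simp [h0, h1, h2, h3, h4, h5, h6, h7, h8, pvCategories]
    by_cases h9 : pvMatch s.toList 9 = true
    · simp [h0, h1, h2, h3, h4, h5, h6, h7, h8, h9, pvCategories]
    by_cases h10 : pvMatch s.toList 10 = true
    · simp [h0, h1, h2, h3, h4, h5, h6, h7, h8, h9, h10, pvCategories]
    simp [h0, h1, h2, h3, h4, h5, h6, h7, h8, h9, h10, pvCategories]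

-- ===== VERDICT (by name: the statement is the Claim_ definition above) =====
theorem smoke_failure_category_py_spec : Claim_equal_smoke_failure_category_py := by
  intro row _
  unfold Spec_smoke_failure_category_py smoke_failure_category_py smoke_failure_category_py_alt
  exact pvAB _
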